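-- pv_equiv track=rewrite | github.com/IchBinJade/advent-of-code-python | 2018/day05.py | part_two
-- ===== SOURCE A (Python) =====
-- LETTERS = {
--     1: "A, a", 2: "B, b", 3: "C, c", 4: "D, d", 5: "E, e", 6: "F, f", 7: "G, g", 8: "H, h",
--     9: "I, i", 10: "J, j", 11: "K, k", 12: "L, l", 13: "M, m", 14: "N, n", 15: "O, o", 16: "P, p",
--     17: "Q, q", 18: "R, r", 19: "S, s", 20: "T, t", 21: "U, u", 22: "V, v", 23: "W, w", 24: "X, x", 25: "Y, y", 26: "Z, z", }
--
-- def perform_reactions(polymers):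
--     stack = []
--     for char in polymers:
--         if stack and ((char.islower() and stack[-1] == char.upper()) or (char.isupper()and stack[-1] == char.lower())):
--             stack.pop()
--         else:
--             stack.append(char)
--
--     return "".join(stack)
--
-- def part_two(data_input):
--     input_str = "".join(data_input)
--     reactions = []
--     for letters_idx in range(1, 27):
--         mod_str = input_str
--         # Remove/replace A-Z or a-z then react
--         for letter in range(2):
--             mod_str = mod_str.replace(LETTERS[letters_idx].split(", ")[letter], "")
--         reacted_str = perform_reactions(mod_str)
--         reactions.append(reacted_str)
--
--     return min([len(r_str) for r_str in reactions])
-- ===== SOURCE B (Python) =====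
-- def part_two(data_input):
--     s = "".join(data_input)
--     letters = "abcdefghijklmnopqrstuvwxyz"
--     # one pass over the polymer, maintaining 26 reaction stacks at once:
--     # stack for letter l ignores every unit of type l and reacts the rest
--     stacks = {l: [] for l in letters}
--     for c in s:
--         cl = c.lower()
--         for l, st in stacks.items():
--             if cl == l:
--                 continue
--             if st and st[-1] != c and st[-1].lower() == cl:
--                 st.pop()
--             else:
--                 st.append(c)
--     return min(len(st) for st in stacks.values())
-- ===== Notes on version B (the rewrite author's own statement) =====
-- stated objective: alternative
-- what changed: B makes a SINGLE pass over the polymer maintaining 26 concurrent reaction stacks (stack for letter l skips units of type l and reacts the rest as they arrive), then takes the min stack length, instead of A's 26 separate rounds of two str.replace passes followed by a full stack reaction each.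
import Mathlib
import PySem

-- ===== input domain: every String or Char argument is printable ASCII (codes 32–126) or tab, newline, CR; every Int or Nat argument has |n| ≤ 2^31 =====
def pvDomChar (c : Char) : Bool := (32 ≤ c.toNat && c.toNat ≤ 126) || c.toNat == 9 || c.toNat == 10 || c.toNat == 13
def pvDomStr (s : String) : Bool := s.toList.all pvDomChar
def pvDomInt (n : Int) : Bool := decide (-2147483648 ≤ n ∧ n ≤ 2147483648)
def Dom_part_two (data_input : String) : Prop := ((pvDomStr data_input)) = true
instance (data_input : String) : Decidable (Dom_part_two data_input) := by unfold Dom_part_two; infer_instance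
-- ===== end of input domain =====

-- B makes ONE pass over the polymer maintaining 26 concurrent reaction stks (stack for
-- letter l skips that letter and reacts the rest), instead of A's 26 replace+react rounds.

-- ===== PORT A =====
def pvLETTERS : PySem.Dict Int String := PySem.Dict.ofList
  [(1, "A, a"), (2, "B, b"), (3, "C, c"), (4, "D, d"), (5, "E, e"), (6, "F, f"), (7, "G, g"),
   (8, "H, h"), (9, "I, i"), (10, "J, j"), (11, "K, k"), (12, "L, l"), (13, "M, m"), (14, "N, n"),
   (15, "O, o"), (16, "P, p"), (17, "Q, q"), (18, "R, r"), (19, "S, s"), (20, "T, t"), (21, "U, u"),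
   (22, "V, v"), (23, "W, w"), (24, "X, x"), (25, "Y, y"), (26, "Z, z")]

-- A's reaction test: char.islower() and stack[-1] == char.upper() or char.isupper() and stack[-1] == char.lower()
def pvMatchA (top char : Char) : Bool :=
  (PySem.Chars.islower char && (top == PySem.Chars.upperChar char)) ||
  (PySem.Chars.isupper char && (top == PySem.Chars.lowerChar char))

-- Python appends/pops at the END of its stack list; here the stack is kept head-first and reversed at the end.
def pvStepA (stack : List Char) (char : Char) : List Char :=
  match stack with
  | [] => [char]
  | top :: rest => if pvMatchA top char then rest else char :: top :: rest

def pvPerformReactions (polymers : List Char) : List Char :=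
  (polymers.foldl pvStepA []).reverse

-- LETTERS[letters_idx].split(", ")[letter]: every lookup always succeeds (literal dict with keys 1..26,
-- split always yields two pieces), so the getD defaults are never used.
def pvNeedle (letters_idx letter : Int) : List Char :=
  ((PySem.List.pyGet? ((PySem.Str.split? (pvLETTERS.getD letters_idx "") ", ").getD []) letter).getD "").toList

def part_two (data_input : String) : Int :=
  -- input_str = "".join(data_input): joining the characters of a string gives the string back
  let input_str := data_input.toList
  let reactions : List (List Char) :=
    (PySem.List.pyRange 1 27 1).foldl (fun reactions letters_idx =>
      let mod_str := (PySem.List.pyRange 0 2 1).foldl (fun mod_str letter =>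
          PySem.Chars.replace mod_str (pvNeedle letters_idx letter) []) input_str
      reactions ++ [pvPerformReactions mod_str]) []
  -- min over a 26-element list: never empty, so the getD default is never used
  (PySem.List.min? (reactions.map (fun r => (r.length : Int))) (fun x => x)).getD 0

-- ===== PORT B =====
def pvLetterList : List Char := "abcdefghijklmnopqrstuvwxyz".toList

-- B's push with its reaction test: st[-1] != c and st[-1].lower() == c.lower()
-- (stack kept head-first; Python appends/pops at the end of its list)
def pvStepB (st : List Char) (c : Char) : List Char :=
  match st with
  | [] => [c]
  | top :: rest =>
      if (top != c) && (PySem.Chars.lowerChar top == PySem.Chars.lowerChar c) then rest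
      else c :: top :: rest

-- one character applied to one (letter, stack) entry of the dict
def pvUpdate (c : Char) (entry : Char × List Char) : Char × List Char :=
  if PySem.Chars.lowerChar c == entry.1 then entry
  else (entry.1, pvStepB entry.2 c)

def part_two_alt (data_input : String) : Int :=
  let s := data_input.toList
  let stks := s.foldl (fun stks c => stks.map (pvUpdate c))
    (pvLetterList.map (fun l => (l, ([] : List Char))))
  -- min over 26 stks: never empty, so the getD default is never used
  (PySem.List.min? (stks.map (fun e => (e.2.length : Int))) (fun x => x)).getD 0

-- ===== PRECONDITION & SPEC =====
def Spec_part_two (data_input : String) (out : Int) : Prop := out = part_two_alt data_input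
instance (data_input : String) (out : Int) : Decidable (Spec_part_two data_input out) := by unfold Spec_part_two; infer_instance

-- ===== CLAIM (what is proved, stated in full; the proofs are below) =====
def Claim_equal_part_two : Prop := ∀ (data_input : String), Dom_part_two data_input → Spec_part_two data_input (part_two data_input)

-- ===== LEMMAS AND PROOFS =====

-- characters, numerically
theorem pvChar_eq_iff (a b : Char) : a = b ↔ a.toNat = b.toNat :=
  ⟨fun h => h ▸ rfl, fun h => Char.ext (UInt32.toNat_inj.mp h)⟩

theorem pvToNat_ofNat (n : Nat) (h : n < 55296) : (Char.ofNat n).toNat = n := by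
  rw [Char.toNat_ofNat, if_pos (Or.inl h)]

theorem pvLe_iff (a c : Char) : (a ≤ c) ↔ a.toNat ≤ c.toNat := by
  rw [Char.le_def, UInt32.le_iff_toNat_le]
  exact Iff.rfl

theorem pvIslower_iff (c : Char) : PySem.Chars.islower c = true ↔ 97 ≤ c.toNat ∧ c.toNat ≤ 122 := by
  simp only [PySem.Chars.islower, Bool.and_eq_true, decide_eq_true_eq, pvLe_iff]
  exact Iff.rfl

theorem pvIsupper_iff (c : Char) : PySem.Chars.isupper c = true ↔ 65 ≤ c.toNat ∧ c.toNat ≤ 90 := by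
  simp only [PySem.Chars.isupper, Bool.and_eq_true, decide_eq_true_eq, pvLe_iff]
  exact Iff.rfl

-- lowerChar / upperChar on character codes
def pvLN (n : Nat) : Nat := if 65 ≤ n ∧ n ≤ 90 then n + 32 else n

theorem pvToNat_lower (c : Char) : (PySem.Chars.lowerChar c).toNat = pvLN c.toNat := by
  unfold PySem.Chars.lowerChar pvLN
  by_cases h : PySem.Chars.isupper c = true
  · have hb := (pvIsupper_iff c).mp h
    rw [if_pos h, if_pos hb]
    exact pvToNat_ofNat _ (by omega)
  · rw [if_neg h, if_neg (fun hb => h ((pvIsupper_iff c).mpr hb))]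

theorem pvToNat_upper (c : Char) (h : PySem.Chars.islower c = true) :
    (PySem.Chars.upperChar c).toNat = c.toNat - 32 := by
  unfold PySem.Chars.upperChar
  have hb := (pvIslower_iff c).mp h
  rw [if_pos h]
  exact pvToNat_ofNat _ (by omega)

theorem pvLowerChar_of_islower (l : Char) (hl : PySem.Chars.islower l = true) :
    PySem.Chars.lowerChar l = l := by
  have hb := (pvIslower_iff l).mp hl
  rw [pvChar_eq_iff, pvToNat_lower]
  unfold pvLN
  rw [if_neg (by omega)]

-- A's and B's reaction tests agree on every pair of characters
theorem pvMatch_eq (t c : Char) :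
    pvMatchA t c = ((t != c) && (PySem.Chars.lowerChar t == PySem.Chars.lowerChar c)) := by
  have hA : pvMatchA t c = true ↔
      ((97 ≤ c.toNat ∧ c.toNat ≤ 122 ∧ t.toNat = c.toNat - 32) ∨
       (65 ≤ c.toNat ∧ c.toNat ≤ 90 ∧ t.toNat = c.toNat + 32)) := by
    simp only [pvMatchA, Bool.or_eq_true, Bool.and_eq_true, beq_iff_eq]
    constructor
    · rintro (⟨hl, ht⟩ | ⟨hu, ht⟩)
      · have hb := (pvIslower_iff c).mp hl
        left
        refine ⟨hb.1, hb.2, ?_⟩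
        rw [(pvChar_eq_iff _ _).mp ht, pvToNat_upper c hl]
      · have hb := (pvIsupper_iff c).mp hu
        right
        refine ⟨hb.1, hb.2, ?_⟩
        rw [(pvChar_eq_iff _ _).mp ht, pvToNat_lower, pvLN, if_pos hb]
    · rintro (⟨h1, h2, h3⟩ | ⟨h1, h2, h3⟩)
      · have hl : PySem.Chars.islower c = true := (pvIslower_iff c).mpr ⟨h1, h2⟩
        left
        refine ⟨hl, (pvChar_eq_iff _ _).mpr ?_⟩
        rw [pvToNat_upper c hl]; omega
      · have hu : PySem.Chars.isupper c = true := (pvIsupper_iff c).mpr ⟨h1, h2⟩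
        right
        refine ⟨hu, (pvChar_eq_iff _ _).mpr ?_⟩
        rw [pvToNat_lower, pvLN, if_pos ⟨h1, h2⟩]; omega
  have hB : ((t != c) && (PySem.Chars.lowerChar t == PySem.Chars.lowerChar c)) = true ↔
      (¬ t.toNat = c.toNat ∧ pvLN t.toNat = pvLN c.toNat) := by
    simp only [Bool.and_eq_true, bne_iff_ne, ne_eq, beq_iff_eq]
    rw [pvChar_eq_iff t c, pvChar_eq_iff (PySem.Chars.lowerChar t) (PySem.Chars.lowerChar c),
      pvToNat_lower, pvToNat_lower]
  have hiff : pvMatchA t c = true ↔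
      ((t != c) && (PySem.Chars.lowerChar t == PySem.Chars.lowerChar c)) = true := by
    rw [hA, hB]
    unfold pvLN
    split_ifs <;> omega
  cases hx : pvMatchA t c with
  | true => exact (hiff.mp hx).symm
  | false =>
    cases hy : ((t != c) && (PySem.Chars.lowerChar t == PySem.Chars.lowerChar c)) with
    | true => rw [← hx, hiff.mpr hy]
    | false => rfl

-- A's reaction stack step equals B's
theorem pvStepA_eq_stepB : pvStepA = pvStepB := by
  funext st c
  cases st with
  | nil => rfl
  | cons t ts => simp [pvStepA, pvStepB, pvMatch_eq]

def pvReact (chars : List Char) : List Char :=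
  (chars.foldl pvStepB []).reverse

theorem pvPerform_eq_react (s : List Char) : pvPerformReactions s = pvReact s := by
  unfold pvPerformReactions pvReact
  rw [pvStepA_eq_stepB]

-- replacing a single character by "" is filtering it out
theorem pvReplace_go (c : Char) (fuel : Nat) :
    ∀ (l acc : List Char), l.length ≤ fuel →
      PySem.Chars.replace.go [c] [] fuel l acc = acc.reverse ++ l.filter (fun x => !(c == x)) := by
  induction fuel with
  | zero =>
    intro l acc h
    have : l = [] := List.eq_nil_of_length_eq_zero (Nat.le_zero.mp h)
    subst this
    simp [PySem.Chars.replace.go]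
  | succ n ih =>
    intro l acc h
    cases l with
    | nil => simp [PySem.Chars.replace.go]
    | cons c0 t =>
      by_cases hc : (c == c0) = true
      · rw [PySem.Chars.replace.go]
        simp only [List.isPrefixOf, hc, Bool.and_self, if_true, List.length_cons,
          List.length_nil, List.drop_succ_cons, List.drop_zero, List.reverse_nil, List.nil_append]
        rw [ih t acc (by simpa using Nat.le_of_succ_le_succ h)]
        simp [hc]
      · rw [PySem.Chars.replace.go]
        simp only [List.isPrefixOf, hc, Bool.false_and]
        rw [if_neg (by simp), ih t (c0 :: acc) (by simpa using Nat.le_of_succ_le_succ h)]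
        simp [hc]

theorem pvReplace_singleton (s : List Char) (c : Char) :
    PySem.Chars.replace s [c] [] = s.filter (fun x => !(c == x)) := by
  unfold PySem.Chars.replace
  rw [if_neg (by simp)]
  rw [pvReplace_go c s.length s [] (Nat.le_refl _)]
  simp

-- fiber of lowerChar over a lowercase letter
theorem pvLower_fiber (l c : Char) (hl : PySem.Chars.islower l = true) :
    PySem.Chars.lowerChar c = l ↔ c = l ∨ c = PySem.Chars.upperChar l := by
  have hb := (pvIslower_iff l).mp hl
  rw [pvChar_eq_iff, pvChar_eq_iff, pvChar_eq_iff, pvToNat_lower, pvToNat_upper l hl]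
  unfold pvLN
  split_ifs <;> omega

theorem pvPred_eq (l U x : Char) (hl : PySem.Chars.islower l = true)
    (hU : U = PySem.Chars.upperChar l) :
    ((!(l == x)) && (!(U == x))) = !(PySem.Chars.lowerChar x == l) := by
  have hfib := pvLower_fiber l x hl
  by_cases h1 : x = l
  · subst h1
    simp [pvLowerChar_of_islower x hl]
  · by_cases h2 : x = U
    · have hx : PySem.Chars.lowerChar x = l := hfib.mpr (Or.inr (h2.trans hU))
      subst h2
      simp [hx]
    · have hx : ¬ PySem.Chars.lowerChar x = l :=
        fun h => (hfib.mp h).elim h1 (fun h' => h2 (h'.trans hU.symm))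
      have b1 : (l == x) = false := beq_eq_false_iff_ne.mpr (Ne.symm h1)
      have b2 : (U == x) = false := beq_eq_false_iff_ne.mpr (Ne.symm h2)
      have b3 : (PySem.Chars.lowerChar x == l) = false := beq_eq_false_iff_ne.mpr hx
      rw [b1, b2, b3]
      rfl

-- one round of A's outer loop: remove both cases of the letter, then react
theorem pvBranch (input : List Char) (l U : Char) (hl : PySem.Chars.islower l = true)
    (hU : U = PySem.Chars.upperChar l) :
    pvPerformReactions (PySem.Chars.replace (PySem.Chars.replace input [U] []) [l] []) =
    pvReact (input.filter (fun c => !(PySem.Chars.lowerChar c == l))) := by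
  rw [pvPerform_eq_react, pvReplace_singleton, pvReplace_singleton, List.filter_filter]
  have hfeq : input.filter (fun a => (!(l == a)) && (!(U == a))) =
      input.filter (fun c => !(PySem.Chars.lowerChar c == l)) :=
    List.filter_congr (fun x _ => pvPred_eq l U x hl hU)
  rw [hfeq]

-- B's fold of per-character map updates = map of per-entry folds
theorem pvFoldl_map {beta : Type} (g : Char → beta → beta) (s : List Char) :
    ∀ (xs0 : List beta),
      s.foldl (fun xs c => xs.map (g c)) xs0 = xs0.map (fun x => s.foldl (fun a c => g c a) x) := by
  induction s with
  | nil => intro xs0; simp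
  | cons c s ih =>
    intro xs0
    simp only [List.foldl, ih (xs0.map (g c)), List.map_map]
    rfl

-- pvUpdate keeps the letter and folds the stack with a skip
theorem pvUpdate_foldl (s : List Char) :
    ∀ (l : Char) (st : List Char),
      s.foldl (fun e c => pvUpdate c e) (l, st) =
        (l, s.foldl (fun st c => if PySem.Chars.lowerChar c == l then st else pvStepB st c) st) := by
  induction s with
  | nil => intro l st; rfl
  | cons c s ih =>
    intro l st
    simp only [List.foldl]
    by_cases h : (PySem.Chars.lowerChar c == l) = true
    · rw [show pvUpdate c (l, st) = (l, st) from by simp [pvUpdate, h], if_pos h, ih]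
    · rw [show pvUpdate c (l, st) = (l, pvStepB st c) from by
        simp [pvUpdate, Bool.not_eq_true _ |>.mp h], if_neg (by simp [Bool.not_eq_true _ |>.mp h]), ih]

-- folding with a skip condition = folding over the filtered list
theorem pvSkip_filter (l : Char) (s : List Char) :
    ∀ (st : List Char),
      (s.filter (fun c => !(PySem.Chars.lowerChar c == l))).foldl pvStepB st =
      s.foldl (fun st c => if PySem.Chars.lowerChar c == l then st else pvStepB st c) st := by
  induction s with
  | nil => intro st; rfl
  | cons c s ih =>
    intro st
    by_cases h : (PySem.Chars.lowerChar c == l) = true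
    · simpa [List.filter_cons, List.foldl, h] using ih st
    · simpa [List.filter_cons, List.foldl, h] using ih (pvStepB st c)

-- ===== VERDICT (by name: the statement is the Claim_ definition above) =====
theorem part_two_spec : Claim_equal_part_two := by
  intro data_input _
  show part_two data_input = part_two_alt data_input
  simp only [part_two, part_two_alt]
  rw [PySem.List.foldl_append_singleton_eq_map
    (f := fun letters_idx => pvPerformReactions ((PySem.List.pyRange 0 2 1).foldl (fun mod_str letter =>
      PySem.Chars.replace mod_str (pvNeedle letters_idx letter) []) data_input.toList))]
  have hRange2 : PySem.List.pyRange 0 2 1 = [0, 1] := by decide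
  rw [show PySem.List.pyRange 1 27 1 = [1,2,3,4,5,6,7,8,9,10,11,12,13,14,15,16,17,18,19,20,21,22,23,24,25,26] from by decide,
     show pvLetterList = ['a','b','c','d','e','f','g','h','i','j','k','l','m','n','o','p','q','r','s','t','u','v','w','x','y','z'] from by decide]
  set input := data_input.toList with hinput
  rw [pvFoldl_map pvUpdate input]
  simp only [List.map, List.nil_append, pvUpdate_foldl]
  have e1 : ((pvPerformReactions ((PySem.List.pyRange 0 2 1).foldl (fun mod_str letter =>
      PySem.Chars.replace mod_str (pvNeedle 1 letter) []) input)).length : Int) =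
      ((input.foldl (fun st c => if PySem.Chars.lowerChar c == 'a' then st else pvStepB st c) []).length : Int) := by
    rw [hRange2]
    simp only [List.foldl]
    rw [show pvNeedle 1 0 = ['A'] from by decide, show pvNeedle 1 1 = ['a'] from by decide,
      pvBranch input 'a' 'A' (by decide) (by decide), pvReact, List.length_reverse, pvSkip_filter]
  have e2 : ((pvPerformReactions ((PySem.List.pyRange 0 2 1).foldl (fun mod_str letter =>
      PySem.Chars.replace mod_str (pvNeedle 2 letter) []) input)).length : Int) =
      ((input.foldl (fun st c => if PySem.Chars.lowerChar c == 'b' then st else pvStepB st c) []).length : Int) := by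
    rw [hRange2]
    simp only [List.foldl]
    rw [show pvNeedle 2 0 = ['B'] from by decide, show pvNeedle 2 1 = ['b'] from by decide,
      pvBranch input 'b' 'B' (by decide) (by decide), pvReact, List.length_reverse, pvSkip_filter]
  have e3 : ((pvPerformReactions ((PySem.List.pyRange 0 2 1).foldl (fun mod_str letter =>
      PySem.Chars.replace mod_str (pvNeedle 3 letter) []) input)).length : Int) =
      ((input.foldl (fun st c => if PySem.Chars.lowerChar c == 'c' then st else pvStepB st c) []).length : Int) := by
    rw [hRange2]
    simp only [List.foldl]
    rw [show pvNeedle 3 0 = ['C'] from by decide, show pvNeedle 3 1 = ['c'] from by decide,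
      pvBranch input 'c' 'C' (by decide) (by decide), pvReact, List.length_reverse, pvSkip_filter]
  have e4 : ((pvPerformReactions ((PySem.List.pyRange 0 2 1).foldl (fun mod_str letter =>
      PySem.Chars.replace mod_str (pvNeedle 4 letter) []) input)).length : Int) =
      ((input.foldl (fun st c => if PySem.Chars.lowerChar c == 'd' then st else pvStepB st c) []).length : Int) := by
    rw [hRange2]
    simp only [List.foldl]
    rw [show pvNeedle 4 0 = ['D'] from by decide, show pvNeedle 4 1 = ['d'] from by decide,
      pvBranch input 'd' 'D' (by decide) (by decide), pvReact, List.length_reverse, pvSkip_filter]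
  have e5 : ((pvPerformReactions ((PySem.List.pyRange 0 2 1).foldl (fun mod_str letter =>
      PySem.Chars.replace mod_str (pvNeedle 5 letter) []) input)).length : Int) =
      ((input.foldl (fun st c => if PySem.Chars.lowerChar c == 'e' then st else pvStepB st c) []).length : Int) := by
    rw [hRange2]
    simp only [List.foldl]
    rw [show pvNeedle 5 0 = ['E'] from by decide, show pvNeedle 5 1 = ['e'] from by decide,
      pvBranch input 'e' 'E' (by decide) (by decide), pvReact, List.length_reverse, pvSkip_filter]
  have e6 : ((pvPerformReactions ((PySem.List.pyRange 0 2 1).foldl (fun mod_str letter =>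
      PySem.Chars.replace mod_str (pvNeedle 6 letter) []) input)).length : Int) =
      ((input.foldl (fun st c => if PySem.Chars.lowerChar c == 'f' then st else pvStepB st c) []).length : Int) := by
    rw [hRange2]
    simp only [List.foldl]
    rw [show pvNeedle 6 0 = ['F'] from by decide, show pvNeedle 6 1 = ['f'] from by decide,
      pvBranch input 'f' 'F' (by decide) (by decide), pvReact, List.length_reverse, pvSkip_filter]
  have e7 : ((pvPerformReactions ((PySem.List.pyRange 0 2 1).foldl (fun mod_str letter =>
      PySem.Chars.replace mod_str (pvNeedle 7 letter) []) input)).length : Int) =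
      ((input.foldl (fun st c => if PySem.Chars.lowerChar c == 'g' then st else pvStepB st c) []).length : Int) := by
    rw [hRange2]
    simp only [List.foldl]
    rw [show pvNeedle 7 0 = ['G'] from by decide, show pvNeedle 7 1 = ['g'] from by decide,
      pvBranch input 'g' 'G' (by decide) (by decide), pvReact, List.length_reverse, pvSkip_filter]
  have e8 : ((pvPerformReactions ((PySem.List.pyRange 0 2 1).foldl (fun mod_str letter =>
      PySem.Chars.replace mod_str (pvNeedle 8 letter) []) input)).length : Int) =
      ((input.foldl (fun st c => if PySem.Chars.lowerChar c == 'h' then st else pvStepB st c) []).length : Int) := by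
    rw [hRange2]
    simp only [List.foldl]
    rw [show pvNeedle 8 0 = ['H'] from by decide, show pvNeedle 8 1 = ['h'] from by decide,
      pvBranch input 'h' 'H' (by decide) (by decide), pvReact, List.length_reverse, pvSkip_filter]
  have e9 : ((pvPerformReactions ((PySem.List.pyRange 0 2 1).foldl (fun mod_str letter =>
      PySem.Chars.replace mod_str (pvNeedle 9 letter) []) input)).length : Int) =
      ((input.foldl (fun st c => if PySem.Chars.lowerChar c == 'i' then st else pvStepB st c) []).length : Int) := by
    rw [hRange2]
    simp only [List.foldl]
    rw [show pvNeedle 9 0 = ['I'] from by decide, show pvNeedle 9 1 = ['i'] from by decide,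
      pvBranch input 'i' 'I' (by decide) (by decide), pvReact, List.length_reverse, pvSkip_filter]
  have e10 : ((pvPerformReactions ((PySem.List.pyRange 0 2 1).foldl (fun mod_str letter =>
      PySem.Chars.replace mod_str (pvNeedle 10 letter) []) input)).length : Int) =
      ((input.foldl (fun st c => if PySem.Chars.lowerChar c == 'j' then st else pvStepB st c) []).length : Int) := by
    rw [hRange2]
    simp only [List.foldl]
    rw [show pvNeedle 10 0 = ['J'] from by decide, show pvNeedle 10 1 = ['j'] from by decide,
      pvBranch input 'j' 'J' (by decide) (by decide), pvReact, List.length_reverse, pvSkip_filter]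
  have e11 : ((pvPerformReactions ((PySem.List.pyRange 0 2 1).foldl (fun mod_str letter =>
      PySem.Chars.replace mod_str (pvNeedle 11 letter) []) input)).length : Int) =
      ((input.foldl (fun st c => if PySem.Chars.lowerChar c == 'k' then st else pvStepB st c) []).length : Int) := by
    rw [hRange2]
    simp only [List.foldl]
    rw [show pvNeedle 11 0 = ['K'] from by decide, show pvNeedle 11 1 = ['k'] from by decide,
      pvBranch input 'k' 'K' (by decide) (by decide), pvReact, List.length_reverse, pvSkip_filter]
  have e12 : ((pvPerformReactions ((PySem.List.pyRange 0 2 1).foldl (fun mod_str letter =>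
      PySem.Chars.replace mod_str (pvNeedle 12 letter) []) input)).length : Int) =
      ((input.foldl (fun st c => if PySem.Chars.lowerChar c == 'l' then st else pvStepB st c) []).length : Int) := by
    rw [hRange2]
    simp only [List.foldl]
    rw [show pvNeedle 12 0 = ['L'] from by decide, show pvNeedle 12 1 = ['l'] from by decide,
      pvBranch input 'l' 'L' (by decide) (by decide), pvReact, List.length_reverse, pvSkip_filter]
  have e13 : ((pvPerformReactions ((PySem.List.pyRange 0 2 1).foldl (fun mod_str letter =>
      PySem.Chars.replace mod_str (pvNeedle 13 letter) []) input)).length : Int) =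
      ((input.foldl (fun st c => if PySem.Chars.lowerChar c == 'm' then st else pvStepB st c) []).length : Int) := by
    rw [hRange2]
    simp only [List.foldl]
    rw [show pvNeedle 13 0 = ['M'] from by decide, show pvNeedle 13 1 = ['m'] from by decide,
      pvBranch input 'm' 'M' (by decide) (by decide), pvReact, List.length_reverse, pvSkip_filter]
  have e14 : ((pvPerformReactions ((PySem.List.pyRange 0 2 1).foldl (fun mod_str letter =>
      PySem.Chars.replace mod_str (pvNeedle 14 letter) []) input)).length : Int) =
      ((input.foldl (fun st c => if PySem.Chars.lowerChar c == 'n' then st else pvStepB st c) []).length : Int) := by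
    rw [hRange2]
    simp only [List.foldl]
    rw [show pvNeedle 14 0 = ['N'] from by decide, show pvNeedle 14 1 = ['n'] from by decide,
      pvBranch input 'n' 'N' (by decide) (by decide), pvReact, List.length_reverse, pvSkip_filter]
  have e15 : ((pvPerformReactions ((PySem.List.pyRange 0 2 1).foldl (fun mod_str letter =>
      PySem.Chars.replace mod_str (pvNeedle 15 letter) []) input)).length : Int) =
      ((input.foldl (fun st c => if PySem.Chars.lowerChar c == 'o' then st else pvStepB st c) []).length : Int) := by
    rw [hRange2]
    simp only [List.foldl]
    rw [show pvNeedle 15 0 = ['O'] from by decide, show pvNeedle 15 1 = ['o'] from by decide,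
      pvBranch input 'o' 'O' (by decide) (by decide), pvReact, List.length_reverse, pvSkip_filter]
  have e16 : ((pvPerformReactions ((PySem.List.pyRange 0 2 1).foldl (fun mod_str letter =>
      PySem.Chars.replace mod_str (pvNeedle 16 letter) []) input)).length : Int) =
      ((input.foldl (fun st c => if PySem.Chars.lowerChar c == 'p' then st else pvStepB st c) []).length : Int) := by
    rw [hRange2]
    simp only [List.foldl]
    rw [show pvNeedle 16 0 = ['P'] from by decide, show pvNeedle 16 1 = ['p'] from by decide,
      pvBranch input 'p' 'P' (by decide) (by decide), pvReact, List.length_reverse, pvSkip_filter]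
  have e17 : ((pvPerformReactions ((PySem.List.pyRange 0 2 1).foldl (fun mod_str letter =>
      PySem.Chars.replace mod_str (pvNeedle 17 letter) []) input)).length : Int) =
      ((input.foldl (fun st c => if PySem.Chars.lowerChar c == 'q' then st else pvStepB st c) []).length : Int) := by
    rw [hRange2]
    simp only [List.foldl]
    rw [show pvNeedle 17 0 = ['Q'] from by decide, show pvNeedle 17 1 = ['q'] from by decide,
      pvBranch input 'q' 'Q' (by decide) (by decide), pvReact, List.length_reverse, pvSkip_filter]
  have e18 : ((pvPerformReactions ((PySem.List.pyRange 0 2 1).foldl (fun mod_str letter =>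
      PySem.Chars.replace mod_str (pvNeedle 18 letter) []) input)).length : Int) =
      ((input.foldl (fun st c => if PySem.Chars.lowerChar c == 'r' then st else pvStepB st c) []).length : Int) := by
    rw [hRange2]
    simp only [List.foldl]
    rw [show pvNeedle 18 0 = ['R'] from by decide, show pvNeedle 18 1 = ['r'] from by decide,
      pvBranch input 'r' 'R' (by decide) (by decide), pvReact, List.length_reverse, pvSkip_filter]
  have e19 : ((pvPerformReactions ((PySem.List.pyRange 0 2 1).foldl (fun mod_str letter =>
      PySem.Chars.replace mod_str (pvNeedle 19 letter) []) input)).length : Int) =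
      ((input.foldl (fun st c => if PySem.Chars.lowerChar c == 's' then st else pvStepB st c) []).length : Int) := by
    rw [hRange2]
    simp only [List.foldl]
    rw [show pvNeedle 19 0 = ['S'] from by decide, show pvNeedle 19 1 = ['s'] from by decide,
      pvBranch input 's' 'S' (by decide) (by decide), pvReact, List.length_reverse, pvSkip_filter]
  have e20 : ((pvPerformReactions ((PySem.List.pyRange 0 2 1).foldl (fun mod_str letter =>
      PySem.Chars.replace mod_str (pvNeedle 20 letter) []) input)).length : Int) =
      ((input.foldl (fun st c => if PySem.Chars.lowerChar c == 't' then st else pvStepB st c) []).length : Int) := by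
    rw [hRange2]
    simp only [List.foldl]
    rw [show pvNeedle 20 0 = ['T'] from by decide, show pvNeedle 20 1 = ['t'] from by decide,
      pvBranch input 't' 'T' (by decide) (by decide), pvReact, List.length_reverse, pvSkip_filter]
  have e21 : ((pvPerformReactions ((PySem.List.pyRange 0 2 1).foldl (fun mod_str letter =>
      PySem.Chars.replace mod_str (pvNeedle 21 letter) []) input)).length : Int) =
      ((input.foldl (fun st c => if PySem.Chars.lowerChar c == 'u' then st else pvStepB st c) []).length : Int) := by
    rw [hRange2]
    simp only [List.foldl]
    rw [show pvNeedle 21 0 = ['U'] from by decide, show pvNeedle 21 1 = ['u'] from by decide,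
      pvBranch input 'u' 'U' (by decide) (by decide), pvReact, List.length_reverse, pvSkip_filter]
  have e22 : ((pvPerformReactions ((PySem.List.pyRange 0 2 1).foldl (fun mod_str letter =>
      PySem.Chars.replace mod_str (pvNeedle 22 letter) []) input)).length : Int) =
      ((input.foldl (fun st c => if PySem.Chars.lowerChar c == 'v' then st else pvStepB st c) []).length : Int) := by
    rw [hRange2]
    simp only [List.foldl]
    rw [show pvNeedle 22 0 = ['V'] from by decide, show pvNeedle 22 1 = ['v'] from by decide,
      pvBranch input 'v' 'V' (by decide) (by decide), pvReact, List.length_reverse, pvSkip_filter]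
  have e23 : ((pvPerformReactions ((PySem.List.pyRange 0 2 1).foldl (fun mod_str letter =>
      PySem.Chars.replace mod_str (pvNeedle 23 letter) []) input)).length : Int) =
      ((input.foldl (fun st c => if PySem.Chars.lowerChar c == 'w' then st else pvStepB st c) []).length : Int) := by
    rw [hRange2]
    simp only [List.foldl]
    rw [show pvNeedle 23 0 = ['W'] from by decide, show pvNeedle 23 1 = ['w'] from by decide,
      pvBranch input 'w' 'W' (by decide) (by decide), pvReact, List.length_reverse, pvSkip_filter]
  have e24 : ((pvPerformReactions ((PySem.List.pyRange 0 2 1).foldl (fun mod_str letter =>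
      PySem.Chars.replace mod_str (pvNeedle 24 letter) []) input)).length : Int) =
      ((input.foldl (fun st c => if PySem.Chars.lowerChar c == 'x' then st else pvStepB st c) []).length : Int) := by
    rw [hRange2]
    simp only [List.foldl]
    rw [show pvNeedle 24 0 = ['X'] from by decide, show pvNeedle 24 1 = ['x'] from by decide,
      pvBranch input 'x' 'X' (by decide) (by decide), pvReact, List.length_reverse, pvSkip_filter]
  have e25 : ((pvPerformReactions ((PySem.List.pyRange 0 2 1).foldl (fun mod_str letter =>
      PySem.Chars.replace mod_str (pvNeedle 25 letter) []) input)).length : Int) =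
      ((input.foldl (fun st c => if PySem.Chars.lowerChar c == 'y' then st else pvStepB st c) []).length : Int) := by
    rw [hRange2]
    simp only [List.foldl]
    rw [show pvNeedle 25 0 = ['Y'] from by decide, show pvNeedle 25 1 = ['y'] from by decide,
      pvBranch input 'y' 'Y' (by decide) (by decide), pvReact, List.length_reverse, pvSkip_filter]
  have e26 : ((pvPerformReactions ((PySem.List.pyRange 0 2 1).foldl (fun mod_str letter =>
      PySem.Chars.replace mod_str (pvNeedle 26 letter) []) input)).length : Int) =
      ((input.foldl (fun st c => if PySem.Chars.lowerChar c == 'z' then st else pvStepB st c) []).length : Int) := by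
    rw [hRange2]
    simp only [List.foldl]
    rw [show pvNeedle 26 0 = ['Z'] from by decide, show pvNeedle 26 1 = ['z'] from by decide,
      pvBranch input 'z' 'Z' (by decide) (by decide), pvReact, List.length_reverse, pvSkip_filter]
  rw [e1, e2, e3, e4, e5, e6, e7, e8, e9, e10, e11, e12, e13, e14, e15, e16, e17, e18, e19, e20, e21, e22, e23, e24, e25, e26]
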